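-- pv_equiv track=rewrite | github.com/ml-explore/mlx-lm | mlx_lm/thinking_budget.py | has_open_think_block
-- ===== SOURCE A (Python) =====
-- from typing import FrozenSet, List, Optional
--
-- def has_open_think_block(
--     prompt: List[int], think_start_id: int, think_end_id: int
-- ) -> bool:
--     """Check if a prompt ends with an unclosed ``<think>`` block.
--
--     Scans backwards from the end of the prompt looking for the most recent
--     ``<think>`` or ``</think>`` token.  Returns ``True`` if the last one
--     found is ``<think>`` (i.e. the block is still open).
--     """
--     for i in range(len(prompt) - 1, -1, -1):
--         if prompt[i] == think_end_id:
--             return False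
--         elif prompt[i] == think_start_id:
--             return True
--     return False
-- ===== SOURCE B (Python) =====
-- def has_open_think_block(
--     prompt, think_start_id, think_end_id
-- ) -> bool:
--     """Forward single pass keeping a boolean 'is a think block currently open'."""
--     open_block = False
--     for tok in prompt:
--         if tok == think_end_id:
--             open_block = False
--         elif tok == think_start_id:
--             open_block = True
--     return open_block
-- ===== Notes on version B (the rewrite author's own statement) =====
-- stated objective: simpler
-- what changed: Replaces the backward index scan with early returns by a forward single pass over the tokens maintaining an open/closed boolean state (end marker checked first, so the last-seen marker wins just as in A, even when the two ids coincide).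
import Mathlib
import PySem

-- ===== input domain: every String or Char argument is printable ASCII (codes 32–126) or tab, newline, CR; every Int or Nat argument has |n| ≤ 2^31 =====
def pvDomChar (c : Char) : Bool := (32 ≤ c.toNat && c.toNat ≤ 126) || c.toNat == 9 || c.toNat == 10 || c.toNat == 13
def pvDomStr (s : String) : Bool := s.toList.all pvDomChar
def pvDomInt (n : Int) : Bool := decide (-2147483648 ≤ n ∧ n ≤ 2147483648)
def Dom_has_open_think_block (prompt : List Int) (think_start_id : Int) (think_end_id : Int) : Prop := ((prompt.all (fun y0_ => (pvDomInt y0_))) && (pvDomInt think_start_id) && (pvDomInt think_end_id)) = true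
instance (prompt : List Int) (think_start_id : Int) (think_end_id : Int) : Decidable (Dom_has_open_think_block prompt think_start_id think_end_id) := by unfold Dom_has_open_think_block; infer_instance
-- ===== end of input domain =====

-- B replaces A's backward index scan with early returns by a forward single pass
-- keeping an open/closed boolean state (objective: simpler).

-- ===== PORT A =====
-- A's loop 'for i in range(len(prompt)-1, -1, -1)' with its two early returns,
-- as structural recursion over the countdown index list.
def hotbLoopA (prompt : List Int) (think_start_id : Int) (think_end_id : Int) : List Int → Bool
  | [] => false
  | i :: rest =>
    match PySem.List.pyGet? prompt i with
    | some v =>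
      if v == think_end_id then false
      else if v == think_start_id then true
      else hotbLoopA prompt think_start_id think_end_id rest
    | none => false  -- unreachable: every index produced by the range is in bounds

def has_open_think_block (prompt : List Int) (think_start_id : Int) (think_end_id : Int) : Bool :=
  hotbLoopA prompt think_start_id think_end_id
    (PySem.List.pyRange ((prompt.length : Int) - 1) (-1) (-1))

-- ===== PORT B =====
-- B's forward pass: one boolean state, end marker checked first.
def has_open_think_block_alt (prompt : List Int) (think_start_id : Int) (think_end_id : Int) : Bool :=
  prompt.foldl
    (fun open_block tok =>
      if tok == think_end_id then false
      else if tok == think_start_id then true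
      else open_block)
    false

-- ===== PRECONDITION & SPEC =====
def Spec_has_open_think_block (prompt : List Int) (think_start_id : Int) (think_end_id : Int) (out : Bool) : Prop := out = has_open_think_block_alt prompt think_start_id think_end_id
instance (prompt : List Int) (think_start_id : Int) (think_end_id : Int) (out : Bool) : Decidable (Spec_has_open_think_block prompt think_start_id think_end_id out) := by unfold Spec_has_open_think_block; infer_instance

-- ===== CLAIM (what is proved, stated in full; the proofs are below) =====
def Claim_equal_has_open_think_block : Prop := ∀ (prompt : List Int) (think_start_id : Int) (think_end_id : Int), Dom_has_open_think_block prompt think_start_id think_end_id → Spec_has_open_think_block prompt think_start_id think_end_id (has_open_think_block prompt think_start_id think_end_id)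

-- ===== LEMMAS AND PROOFS =====

-- A's loop only reads the prompt at the indices in its index list.
theorem hotbLoopA_congr (p q : List Int) (ts te : Int) (l : List Int)
    (h : ∀ i ∈ l, PySem.List.pyGet? p i = PySem.List.pyGet? q i) :
    hotbLoopA p ts te l = hotbLoopA q ts te l := by
  induction l with
  | nil => rfl
  | cons i rest ih =>
    simp only [hotbLoopA, h i (List.mem_cons_self ..)]
    cases PySem.List.pyGet? q i with
    | none => rfl
    | some v =>
      simp only []
      split_ifs <;> simp_all [ih fun j hj => h j (List.mem_cons_of_mem _ hj)]

theorem hotbLoopA_eq_foldl (ts te : Int) (p : List Int) :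
    hotbLoopA p ts te ((PySem.List.pyRange 0 (p.length : Int) 1).reverse)
      = p.foldl (fun s t => if t == te then false else if t == ts then true else s) false := by
  induction p using List.reverseRecOn with
  | nil => simp [hotbLoopA]
  | append_singleton xs x ih =>
    have hlen : ((xs ++ [x]).length : Int) = (xs.length : Int) + 1 := by
      simp
    rw [hlen, PySem.List.pyRange_one_succ_right (by positivity)]
    simp only [List.reverse_append, List.reverse_singleton, List.singleton_append,
      hotbLoopA, List.foldl_append, List.foldl_cons, List.foldl_nil]
    have hx : PySem.List.pyGet? (xs ++ [x]) (xs.length : Int) = some x := by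
      simpa using PySem.List.pyGet?_append_length (pre := xs) (y := x) (ys := [])
    rw [hx]
    have hcongr : hotbLoopA (xs ++ [x]) ts te ((PySem.List.pyRange 0 (xs.length : Int) 1).reverse)
        = hotbLoopA xs ts te ((PySem.List.pyRange 0 (xs.length : Int) 1).reverse) := by
      apply hotbLoopA_congr
      intro i hi
      rw [List.mem_reverse, PySem.List.mem_pyRange_one] at hi
      obtain ⟨h0, h1⟩ := hi
      rw [PySem.List.pyGet?_of_nonneg (xs ++ [x]) h0, PySem.List.pyGet?_of_nonneg xs h0]
      have : i.toNat < xs.length := by omega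
      rw [List.getElem?_append_left this]
    split_ifs <;> simp_all [ih]

-- ===== VERDICT (by name: the statement is the Claim_ definition above) =====
theorem has_open_think_block_spec : Claim_equal_has_open_think_block := by
  intro prompt ts te _
  show _ = _
  rw [has_open_think_block, has_open_think_block_alt, ← hotbLoopA_eq_foldl]
  congr 1
  have := PySem.List.pyRange_neg_one_eq_reverse ((prompt.length : Int) - 1) (-1)
  simpa using this
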